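-- pv_equiv track=rewrite | github.com/zchen15/plasmid | plasmid/misc.py | format_to_dna
-- ===== SOURCE A (Python) =====
-- def get_IUPAC_nt():
--     return 'ATGCRYSWKMBDHVN'
--
-- def format_to_dna(sequence):
--     '''
--     Convert a string to have only IUPAC dna codes. Other erroneous letters are removed.
--     sequence = string to change to IUPAC only codes
--     return the cleaned string
--     '''
--     allowed = get_IUPAC_nt()
--     out = str(sequence).upper()
--     # convert U to T
--     out = out.replace('U','T')
--     # convert gap characters to N
--     out = out.replace('.','N')
--     out = out.replace('-','N')
--     # remove spaces
--     out = out.replace(' ','')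
--     # remove erroneous characters
--     remove = set(out) - set(allowed)
--     for i in remove:
--         out = out.replace(i,'')
--     return out
-- ===== SOURCE B (Python) =====
-- def get_IUPAC_nt():
--     return 'ATGCRYSWKMBDHVN'
--
-- def format_to_dna(sequence):
--     '''
--     Convert a string to have only IUPAC dna codes. Other erroneous letters are removed.
--     Single pass: substitute U->T, gaps->N, drop spaces and non-IUPAC characters.
--     '''
--     allowed = get_IUPAC_nt()
--     out = []
--     for c in str(sequence).upper():
--         if c == 'U':
--             out.append('T')
--         elif c in '.-':
--             out.append('N')
--         elif c == ' ':
--             pass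
--         elif c in allowed:
--             out.append(c)
--     return ''.join(out)
-- ===== Notes on version B (the rewrite author's own statement) =====
-- stated objective: simpler
-- what changed: Replaces A's four whole-string replace scans plus a set difference and a per-bad-character replace loop by one character-level pass that substitutes/keeps/drops each character into a single output buffer.
import Mathlib
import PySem

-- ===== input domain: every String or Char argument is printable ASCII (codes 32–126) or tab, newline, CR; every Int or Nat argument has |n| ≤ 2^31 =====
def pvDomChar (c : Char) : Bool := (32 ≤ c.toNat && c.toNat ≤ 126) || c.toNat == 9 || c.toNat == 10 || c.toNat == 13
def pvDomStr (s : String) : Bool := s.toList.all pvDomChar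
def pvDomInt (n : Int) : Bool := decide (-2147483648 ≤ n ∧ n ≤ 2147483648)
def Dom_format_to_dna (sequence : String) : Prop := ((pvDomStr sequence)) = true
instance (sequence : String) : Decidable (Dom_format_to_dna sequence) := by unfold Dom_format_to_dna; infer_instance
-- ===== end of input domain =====

-- B replaces A's four whole-string replace scans, set difference and per-character replace loop
-- by a single character-level pass with one output buffer (objective: simpler).


-- ===== PORT A =====
def get_IUPAC_nt : String := "ATGCRYSWKMBDHVN"

def format_to_dna (sequence : String) : String :=
  let allowed := get_IUPAC_nt
  let out0 := PySem.Str.upper sequence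
  let out1 := PySem.Str.replace out0 "U" "T"
  let out2 := PySem.Str.replace out1 "." "N"
  let out3 := PySem.Str.replace out2 "-" "N"
  let out4 := PySem.Str.replace out3 " " ""
  let remove := PySem.Set.diff (PySem.Set.ofList out4.toList) (PySem.Set.ofList allowed.toList)
  remove.foldl (fun acc i => PySem.Str.replace acc (String.ofList [i]) "") out4

-- ===== PORT B =====
def format_to_dna_alt (sequence : String) : String :=
  let allowed := get_IUPAC_nt
  let out : List Char :=
    (PySem.Str.upper sequence).toList.foldl (fun acc c =>
      if c = 'U' then acc ++ ['T']
      else if c = '.' ∨ c = '-' then acc ++ ['N']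
      else if c = ' ' then acc
      else if allowed.toList.contains c then acc ++ [c]
      else acc) []
  String.ofList out

-- ===== PRECONDITION & SPEC =====
def Spec_format_to_dna (sequence : String) (out : String) : Prop := out = format_to_dna_alt sequence
instance (sequence : String) (out : String) : Decidable (Spec_format_to_dna sequence out) := by unfold Spec_format_to_dna; infer_instance

-- ===== CLAIM (what is proved, stated in full; the proofs are below) =====
def Claim_equal_format_to_dna : Prop := ∀ (sequence : String), Dom_format_to_dna sequence → Spec_format_to_dna sequence (format_to_dna sequence)

-- ===== LEMMAS AND PROOFS =====

-- single-character replace, list level: the worker is a flatMap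
lemma go_single (d : Char) (new : List Char) :
    ∀ (l : List Char) (acc : List Char) (fuel : Nat), l.length ≤ fuel →
      PySem.Chars.replace.go [d] new fuel l acc
        = acc.reverse ++ l.flatMap (fun c => if c = d then new else [c]) := by
  intro l
  induction l with
  | nil => intro acc fuel _; cases fuel <;> simp [PySem.Chars.replace.go]
  | cons c t ih =>
    intro acc fuel hle
    cases fuel with
    | zero => simp at hle
    | succ f =>
      by_cases hcd : c = d
      · subst hcd
        simp [PySem.Chars.replace.go, List.isPrefixOf, ih _ f (by simpa using hle)]
      · simp [PySem.Chars.replace.go, List.isPrefixOf, hcd, Ne.symm hcd,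
              ih _ f (by simpa using hle)]

lemma replace_single (l : List Char) (d : Char) (new : List Char) :
    PySem.Chars.replace l [d] new = l.flatMap (fun c => if c = d then new else [c]) := by
  rw [PySem.Chars.replace]
  simp [go_single d new l [] l.length le_rfl]

lemma flatMap_if_eq_filter (l : List Char) (d : Char) :
    l.flatMap (fun c => if c = d then [] else [c]) = l.filter (fun c => !(c == d)) := by
  induction l with
  | nil => simp
  | cons c t ih => by_cases h : c = d <;> simp [h, ih]

-- A's loop removing each bad character one replace at a time is a single filter
lemma foldl_remove (R : List Char) :
    ∀ (l : List Char),
      R.foldl (fun acc d => acc.flatMap (fun c => if c = d then [] else [c])) l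
        = l.filter (fun c => !R.contains c) := by
  induction R with
  | nil => intro l; simp
  | cons d R ih =>
    intro l
    rw [List.foldl_cons, flatMap_if_eq_filter, ih, List.filter_filter]
    apply List.filter_congr
    intro c _
    by_cases h : c = d <;> simp [h]

-- A's String-level removal loop, moved to the character-list level
lemma strfold (R : List Char) : ∀ (s : String),
    (R.foldl (fun acc i => PySem.Str.replace acc (String.ofList [i]) "") s).toList
      = R.foldl (fun acc d => PySem.Chars.replace acc [d] []) s.toList := by
  induction R with
  | nil => intro s; simp
  | cons d R ih =>
    intro s
    rw [List.foldl_cons, List.foldl_cons, ih]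
    simp [PySem.Str.replace]

-- not being in set(out4) - set(allowed) is, for characters of out4, being allowed
lemma notmem_diff (r4 : List Char) (c : Char) (hc : c ∈ r4) :
    (!List.contains (PySem.Set.diff (PySem.Set.ofList r4) (PySem.Set.ofList get_IUPAC_nt.toList)) c)
      = get_IUPAC_nt.toList.contains c := by
  simp [PySem.Set.diff, PySem.Set.mem_ofList, hc]

-- B's per-character action
def stepB (c : Char) : List Char :=
  if c = 'U' then ['T']
  else if c = '.' ∨ c = '-' then ['N']
  else if c = ' ' then []
  else if get_IUPAC_nt.toList.contains c then [c]
  else []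

-- A's composed substitutions-then-filter agree with B's action on each character
lemma point (c : Char) :
    (if c = 'U' then ['T'] else [c]).flatMap (fun b =>
      (if b = '.' then ['N'] else [b]).flatMap (fun d =>
        (if d = '-' then ['N'] else [d]).flatMap (fun e =>
          (if e = ' ' then [] else [e]).filter (fun x => get_IUPAC_nt.toList.contains x))))
      = stepB c := by
  by_cases hU : c = 'U' <;> by_cases hD : c = '.' <;> by_cases hH : c = '-' <;>
    by_cases hS : c = ' ' <;> simp_all [stepB, List.filter_singleton] <;>
    rfl

-- B's accumulating fold is a flatMap
lemma foldB_eq_flatMap (l : List Char) :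
    l.foldl (fun acc c =>
      if c = 'U' then acc ++ ['T']
      else if c = '.' ∨ c = '-' then acc ++ ['N']
      else if c = ' ' then acc
      else if get_IUPAC_nt.toList.contains c then acc ++ [c]
      else acc) [] = l.flatMap stepB := by
  have h : ∀ (init : List Char), l.foldl (fun acc c =>
      if c = 'U' then acc ++ ['T']
      else if c = '.' ∨ c = '-' then acc ++ ['N']
      else if c = ' ' then acc
      else if get_IUPAC_nt.toList.contains c then acc ++ [c]
      else acc) init = init ++ l.flatMap stepB := by
    induction l with
    | nil => intro init; simp
    | cons c t ih =>
      intro init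
      rw [List.foldl_cons, List.flatMap_cons]
      split_ifs with h1 h2 h3 h4 <;> rw [ih] <;> simp_all [stepB]
  simpa using h []

-- ===== VERDICT (by name: the statement is the Claim_ definition above) =====
theorem format_to_dna_spec : Claim_equal_format_to_dna := by
  intro sequence _
  unfold Spec_format_to_dna format_to_dna format_to_dna_alt
  apply String.toList_inj.mp
  rw [strfold]
  simp only [PySem.Str.replace, String.toList_ofList]
  simp only [show "U".toList = ['U'] by decide, show "T".toList = ['T'] by decide,
    show ".".toList = ['.'] by decide, show "-".toList = ['-'] by decide,
    show "N".toList = ['N'] by decide, show " ".toList = [' '] by decide,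
    show "".toList = ([] : List Char) by decide]
  simp only [replace_single]
  rw [foldl_remove]
  rw [List.filter_congr (fun c hc => notmem_diff _ c hc)]
  simp only [List.filter_flatMap, List.flatMap_assoc]
  rw [foldB_eq_flatMap]
  simp only [point]
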